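-- pv_equiv track=rewrite | github.com/taylorai/cacli | src/cacli/transcript_apply.py | _find_unique_hunk_match
-- ===== SOURCE A (Python) =====
-- def _find_unique_hunk_match(
--     content_lines: list[str], before_lines: list[str], start_idx: int
-- ) -> tuple[int, str | None]:
--     if not before_lines:
--         return start_idx, None
--
--     matches: list[int] = []
--     limit = len(content_lines) - len(before_lines) + 1
--     for idx in range(max(start_idx, 0), max(limit, 0)):
--         if content_lines[idx : idx + len(before_lines)] == before_lines:
--             matches.append(idx)
--     if len(matches) == 1:
--         return matches[0], None
--
--     if not matches:
--         for idx in range(0, max(limit, 0)):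
--             if content_lines[idx : idx + len(before_lines)] == before_lines:
--                 matches.append(idx)
--         if len(matches) == 1:
--             return matches[0], None
--
--     if not matches:
--         return -1, "patch context was not found"
--     return -1, "patch context matched multiple locations"
-- ===== SOURCE B (Python) =====
-- def _find_unique_hunk_match(
--     content_lines: list[str], before_lines: list[str], start_idx: int
-- ) -> tuple[int, str | None]:
--     if not before_lines:
--         return start_idx, None
--
--     m = len(before_lines)
--     first = before_lines[0]
--     limit = len(content_lines) - m + 1
--     # one pass over the whole file: collect ALL match positions, pre-screening
--     # candidates by their first line before comparing the full window
--     positions = [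
--         i
--         for i in range(max(limit, 0))
--         if content_lines[i] == first and content_lines[i : i + m] == before_lines
--     ]
--     lo = max(start_idx, 0)
--     scoped = [i for i in positions if i >= lo]
--     if len(scoped) == 1:
--         return scoped[0], None
--     if not scoped:
--         if len(positions) == 1:
--             return positions[0], None
--         if not positions:
--             return -1, "patch context was not found"
--     return -1, "patch context matched multiple locations"
-- ===== Notes on version B (the rewrite author's own statement) =====
-- stated objective: alternative
-- what changed: B scans the file once, collecting all match positions over the full range (pre-screened by the first pattern line), then decides by filtering that single list by start_idx instead of A's up-to-two separate range scans with full slice comparison at every index.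
import Mathlib
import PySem

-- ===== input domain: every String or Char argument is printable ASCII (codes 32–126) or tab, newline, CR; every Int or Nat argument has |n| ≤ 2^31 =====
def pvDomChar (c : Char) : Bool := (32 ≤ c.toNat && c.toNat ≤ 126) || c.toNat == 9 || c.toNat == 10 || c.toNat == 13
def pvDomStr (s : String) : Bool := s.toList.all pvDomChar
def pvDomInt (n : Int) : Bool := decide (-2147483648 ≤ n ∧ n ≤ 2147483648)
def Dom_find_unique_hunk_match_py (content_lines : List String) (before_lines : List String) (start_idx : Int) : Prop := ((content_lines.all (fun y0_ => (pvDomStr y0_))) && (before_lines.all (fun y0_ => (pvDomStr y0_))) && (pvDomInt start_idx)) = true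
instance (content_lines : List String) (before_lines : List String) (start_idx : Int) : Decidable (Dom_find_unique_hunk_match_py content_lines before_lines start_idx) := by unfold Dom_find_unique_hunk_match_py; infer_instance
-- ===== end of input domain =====

-- B replaces A's up-to-two range scans by ONE scan collecting all match positions
-- (pre-screened by the first pattern line) and decides by filtering that list; return values proved equal.

-- ===== PORT A =====
def find_unique_hunk_match_py (content_lines : List String) (before_lines : List String) (start_idx : Int) : Int × Option String :=
  if before_lines = [] then (start_idx, none)
  else
    let limit : Int := (content_lines.length : Int) - (before_lines.length : Int) + 1
    let matchesL : List Int :=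
      (PySem.List.pyRange (max start_idx 0) (max limit 0) 1).foldl
        (fun acc idx =>
          if PySem.List.slice content_lines (some idx) (some (idx + (before_lines.length : Int))) = before_lines
          then acc ++ [idx] else acc) []
    if matchesL.length = 1 then (matchesL.headD 0, none)
    else if matchesL = [] then
      let matches2 : List Int :=
        (PySem.List.pyRange 0 (max limit 0) 1).foldl
          (fun acc idx =>
            if PySem.List.slice content_lines (some idx) (some (idx + (before_lines.length : Int))) = before_lines
            then acc ++ [idx] else acc) []
      if matches2.length = 1 then (matches2.headD 0, none)
      else if matches2 = [] then (-1, some "patch context was not found")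
      else (-1, some "patch context matched multiple locations")
    else (-1, some "patch context matched multiple locations")

-- ===== PORT B =====
def find_unique_hunk_match_py_alt (content_lines : List String) (before_lines : List String) (start_idx : Int) : Int × Option String :=
  if before_lines = [] then (start_idx, none)
  else
    let m : Int := (before_lines.length : Int)
    let first : String := before_lines.headD ""
    let limit : Int := (content_lines.length : Int) - m + 1
    let positions : List Int :=
      (PySem.List.pyRange 0 (max limit 0) 1).filter
        (fun i => decide (PySem.List.pyGet? content_lines i = some first) &&
                  decide (PySem.List.slice content_lines (some i) (some (i + m)) = before_lines))
    let lo : Int := max start_idx 0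
    let scopedL : List Int := positions.filter (fun i => decide (lo ≤ i))
    if scopedL.length = 1 then (scopedL.headD 0, none)
    else if scopedL = [] then
      if positions.length = 1 then (positions.headD 0, none)
      else if positions = [] then (-1, some "patch context was not found")
      else (-1, some "patch context matched multiple locations")
    else (-1, some "patch context matched multiple locations")

-- ===== PRECONDITION & SPEC =====
def Spec_find_unique_hunk_match_py (content_lines : List String) (before_lines : List String) (start_idx : Int) (out : Int × Option String) : Prop := out = find_unique_hunk_match_py_alt content_lines before_lines start_idx
instance (content_lines : List String) (before_lines : List String) (start_idx : Int) (out : Int × Option String) : Decidable (Spec_find_unique_hunk_match_py content_lines before_lines start_idx out) := by unfold Spec_find_unique_hunk_match_py; infer_instance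

-- ===== CLAIM (what is proved, stated in full; the proofs are below) =====
def Claim_equal_find_unique_hunk_match_py : Prop := ∀ (content_lines : List String) (before_lines : List String) (start_idx : Int), Dom_find_unique_hunk_match_py content_lines before_lines start_idx → Spec_find_unique_hunk_match_py content_lines before_lines start_idx (find_unique_hunk_match_py content_lines before_lines start_idx)

-- ===== LEMMAS AND PROOFS =====

-- A filter over the scan range [lo, L) equals the full-range filter restricted to indices ≥ lo.
theorem filter_pyRange_ge (lo L : Int) (h : 0 ≤ lo) (p : Int → Bool) :
    (PySem.List.pyRange lo L 1).filter p
      = ((PySem.List.pyRange 0 L 1).filter p).filter (fun i => decide (lo ≤ i)) := by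
  rw [List.filter_filter]
  by_cases hll : lo ≤ L
  · rw [PySem.List.pyRange_one_append 0 lo L h hll, List.filter_append]
    have h1 : (PySem.List.pyRange 0 lo 1).filter (fun a => decide (lo ≤ a) && p a) = [] := by
      rw [List.filter_eq_nil_iff]
      intro a ha
      have := PySem.List.mem_pyRange_one.mp ha
      simp [show ¬ lo ≤ a by omega]
    have h2 : (PySem.List.pyRange lo L 1).filter (fun a => decide (lo ≤ a) && p a)
        = (PySem.List.pyRange lo L 1).filter p := by
      apply List.filter_congr
      intro a ha
      have := PySem.List.mem_pyRange_one.mp ha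
      simp [show lo ≤ a by omega]
    rw [h1, h2, List.nil_append]
  · rw [PySem.List.pyRange_one_eq_nil (by omega : L ≤ lo)]
    simp only [List.filter_nil]
    symm
    rw [List.filter_eq_nil_iff]
    intro a ha
    have := PySem.List.mem_pyRange_one.mp ha
    simp [show ¬ lo ≤ a by omega]

-- if a window starting at i ≥ 0 matches the nonempty pattern, the line at i is the first pattern line
theorem slice_match_head (cl bl : List String) (first : String) (rest : List String) (i : Int)
    (h0 : 0 ≤ i) (hbl : bl = first :: rest)
    (hs : PySem.List.slice cl (some i) (some (i + (bl.length : Int))) = bl) :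
    PySem.List.pyGet? cl i = some first := by
  rw [PySem.List.slice_toNat cl h0 (by positivity)] at hs
  rw [PySem.List.pyGet?_of_nonneg _ h0, ← List.head?_drop]
  rcases hd : cl.drop i.toNat with _ | ⟨a, t⟩
  · rw [hd] at hs; rw [hbl] at hs; simp at hs
  · rw [hd] at hs
    rcases hn : ((i + (bl.length : Int)).toNat - i.toNat) with _ | n
    · rw [hn] at hs; rw [hbl] at hs; simp at hs
    · rw [hn, List.take_succ_cons] at hs
      rw [hbl] at hs
      simp_all

-- the two filter predicates agree on the scanned (nonnegative) indices
theorem pred_eq (cl bl : List String) (first : String) (rest : List String) (L : Int)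
    (hbl : bl = first :: rest) :
    ∀ i ∈ PySem.List.pyRange 0 L 1,
      (decide (PySem.List.slice cl (some i) (some (i + (bl.length : Int))) = bl) : Bool)
      = (decide (PySem.List.pyGet? cl i = some first) &&
         decide (PySem.List.slice cl (some i) (some (i + (bl.length : Int))) = bl)) := by
  intro i hi
  have h0 : 0 ≤ i := (PySem.List.mem_pyRange_one.mp hi).1
  by_cases hs : PySem.List.slice cl (some i) (some (i + (bl.length : Int))) = bl
  · rw [decide_eq_true hs, decide_eq_true (slice_match_head cl bl first rest i h0 hbl hs)]
    rfl
  · rw [decide_eq_false hs]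
    simp

-- ===== VERDICT (by name: the statement is the Claim_ definition above) =====
theorem find_unique_hunk_match_py_spec : Claim_equal_find_unique_hunk_match_py := by
  intro cl bl s _
  unfold Spec_find_unique_hunk_match_py find_unique_hunk_match_py find_unique_hunk_match_py_alt
  by_cases hbl : bl = []
  · rw [if_pos hbl, if_pos hbl]
  · obtain ⟨first, rest, hfr⟩ : ∃ f r, bl = f :: r := by
      rcases bl with _ | ⟨f, r⟩
      · exact absurd rfl hbl
      · exact ⟨f, r, rfl⟩
    rw [if_neg hbl, if_neg hbl]
    have hhead : bl.headD "" = first := by rw [hfr]; rfl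
    have hfold : ∀ a b : Int,
        (PySem.List.pyRange a b 1).foldl
          (fun acc idx =>
            if PySem.List.slice cl (some idx) (some (idx + (bl.length : Int))) = bl
            then acc ++ [idx] else acc) []
        = (PySem.List.pyRange a b 1).filter
            (fun idx => decide (PySem.List.slice cl (some idx) (some (idx + (bl.length : Int))) = bl)) := by
      intro a b
      have := PySem.List.foldl_append_if
        (fun idx => decide (PySem.List.slice cl (some idx) (some (idx + (bl.length : Int))) = bl))
        (fun idx : Int => idx) (PySem.List.pyRange a b 1) []
      simpa [List.map_id'] using this
    simp only [hfold, hhead]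
    rw [filter_pyRange_ge (max s 0) _ (le_max_right _ _)]
    rw [List.filter_congr (pred_eq cl bl first rest _ hfr)]
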